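-- pv_equiv track=rewrite | github.com/pypi-data/pypi-mirror-254 | packages/BANOS/BANOS-0.1.5.tar.gz/BANOS-0.1.5/BANOS/BANOS.py | identify_bouts
-- ===== SOURCE A (Python) =====
-- def identify_bouts(sequence):
--     """
--     Identify continuous sequences (bouts) of 1s in a binary sequence.
--
--     Parameters:
--     sequence (list): A list of binary values representing predictions or ground truth.
--
--     Returns:
--     list of tuples: Each tuple contains the start and end indices of a continuous sequence (bout).
--     """
--     # Function implementation...
--     bouts = []
--     start = None
--     for i, value in enumerate(sequence):
--         if value == 1 and start is None:
--             start = i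
--         elif value == 0 and start is not None:
--             bouts.append((start, i - 1))
--             start = None
--     if start is not None:
--         bouts.append((start, len(sequence) - 1))
--     return bouts
-- ===== SOURCE B (Python) =====
-- def identify_bouts(sequence):
--     """
--     Identify continuous sequences (bouts) of 1s in a binary sequence.
--
--     A bout begins at a 1 and lasts until just before the next 0 (or until the
--     end of the sequence); the scan then resumes after that 0.
--
--     Parameters:
--     sequence (list): A list of binary values representing predictions or ground truth.
--
--     Returns:
--     list of tuples: Each tuple contains the start and end indices of a bout.
--     """
--     bouts = []
--     n = len(sequence)
--     i = 0
--     while i < n: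
--         if sequence[i] == 1:
--             j = i + 1
--             while j < n and sequence[j] != 0:
--                 j += 1
--             bouts.append((i, j - 1))
--             i = j + 1
--         else:
--             i += 1
--     return bouts
-- ===== Notes on version B (the rewrite author's own statement) =====
-- stated objective: alternative
-- what changed: Replaces A's single stateful pass with a start=None flag by a two-pointer scan: find the next 1, scan forward to the next 0 to close the bout there, and resume after that 0.
import Mathlib
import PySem

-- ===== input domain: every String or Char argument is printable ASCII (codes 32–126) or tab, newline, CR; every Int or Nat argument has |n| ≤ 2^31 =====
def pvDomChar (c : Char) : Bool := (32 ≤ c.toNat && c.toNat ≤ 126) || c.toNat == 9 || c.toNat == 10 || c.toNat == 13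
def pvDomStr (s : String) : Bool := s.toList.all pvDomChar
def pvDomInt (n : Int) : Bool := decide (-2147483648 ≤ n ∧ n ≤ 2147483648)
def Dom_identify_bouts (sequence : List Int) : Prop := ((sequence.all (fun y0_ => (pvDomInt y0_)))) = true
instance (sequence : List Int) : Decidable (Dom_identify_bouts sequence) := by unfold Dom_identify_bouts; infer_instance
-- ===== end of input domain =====

-- B replaces A's single stateful pass (start=None flag) by a two-pointer scan:
-- find the next 1, scan forward to the next 0 to close the bout, resume after it;
-- same O(n) cost, no speed claim.

-- enumerate(sequence) starting at index k
def pvEnumFrom (k : Int) : List Int → List (Int × Int)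
  | [] => []
  | v :: t => (k, v) :: pvEnumFrom (k + 1) t

-- ===== PORT A =====
-- loop body of A: state = (bouts, start)
def pvStepA (acc : List (Int × Int) × Option Int) (p : Int × Int) :
    List (Int × Int) × Option Int :=
  if p.2 = 1 ∧ acc.2 = none then (acc.1, some p.1)
  else if p.2 = 0 ∧ acc.2 ≠ none then (acc.1 ++ [(acc.2.getD 0, p.1 - 1)], none)
  else acc

def identify_bouts (sequence : List Int) : List (Int × Int) :=
  let st := (pvEnumFrom 0 sequence).foldl pvStepA ([], none)
  match st.2 with
  | some s0 => st.1 ++ [(s0, (sequence.length : Int) - 1)]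
  | none => st.1

-- ===== PORT B =====
-- B's while loops walk an index through the list; they are rendered as structural
-- recursion over the unscanned suffix with the index k carried alongside.
-- inner while: advance j until a 0 (or the end); returns (j, suffix after index j)
def pvFindEnd (k : Int) : List Int → Int × List Int
  | [] => (k, [])
  | v :: t => if v = 0 then (k, t) else pvFindEnd (k + 1) t

lemma pvFindEnd_len (k : Int) (t : List Int) : (pvFindEnd k t).2.length ≤ t.length := by
  induction t generalizing k with
  | nil => simp [pvFindEnd]
  | cons v t ih =>
    by_cases h : v = 0
    · simp [pvFindEnd, h]
    · simpa [pvFindEnd, h] using Nat.le_succ_of_le (ih (k + 1))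

-- outer while over i
def pvScan (k : Int) : List Int → List (Int × Int)
  | [] => []
  | v :: t =>
    if v = 1 then
      let r := pvFindEnd (k + 1) t
      (k, r.1 - 1) :: pvScan (r.1 + 1) r.2
    else pvScan (k + 1) t
termination_by t => t.length
decreasing_by
  · exact Nat.lt_succ_of_le (pvFindEnd_len _ _)
  · exact Nat.lt_succ_self _

def identify_bouts_alt (sequence : List Int) : List (Int × Int) :=
  pvScan 0 sequence

-- ===== PRECONDITION & SPEC =====
def Spec_identify_bouts (sequence : List Int) (out : List (Int × Int)) : Prop := out = identify_bouts_alt sequence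
instance (sequence : List Int) (out : List (Int × Int)) : Decidable (Spec_identify_bouts sequence out) := by unfold Spec_identify_bouts; infer_instance

-- ===== CLAIM (what is proved, stated in full; the proofs are below) =====
def Claim_equal_identify_bouts : Prop := ∀ (sequence : List Int), Dom_identify_bouts sequence → Spec_identify_bouts sequence (identify_bouts sequence)

-- ===== LEMMAS AND PROOFS =====

-- A's loop rewritten as tail recursion over the list, index k, state st
def pvRunA : List Int → Int → Option Int → List (Int × Int)
  | [], _, none => []
  | [], k, some s => [(s, k - 1)]
  | v :: t, k, st =>
    if v = 1 ∧ st = none then pvRunA t (k + 1) (some k)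
    else if v = 0 ∧ st ≠ none then (st.getD 0, k - 1) :: pvRunA t (k + 1) none
    else pvRunA t (k + 1) st

-- A's finalisation step
def pvFinA (st : List (Int × Int) × Option Int) (last : Int) : List (Int × Int) :=
  match st.2 with
  | some s0 => st.1 ++ [(s0, last)]
  | none => st.1

lemma pvStepA_acc (b : List (Int × Int)) (st : Option Int) (p : Int × Int) :
    pvStepA (b, st) p = (b ++ (pvStepA ([], st) p).1, (pvStepA ([], st) p).2) := by
  unfold pvStepA
  by_cases h1 : p.2 = 1 ∧ st = none
  · simp [h1]
  · by_cases h2 : p.2 = 0 ∧ st ≠ none <;> simp [h1, h2]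

lemma pvA_acc (l : List (Int × Int)) (b : List (Int × Int)) (st : Option Int) :
    l.foldl pvStepA (b, st) =
      (b ++ (l.foldl pvStepA ([], st)).1, (l.foldl pvStepA ([], st)).2) := by
  induction l generalizing b st with
  | nil => simp
  | cons p t ih =>
    simp only [List.foldl_cons]
    rw [pvStepA_acc b st p]
    cases hd : pvStepA ([], st) p with
    | mk d st' =>
      simp only
      rw [ih (b ++ d) st', ih d st']
      simp [List.append_assoc]

lemma pvFinA_append (b : List (Int × Int)) (g : List (Int × Int) × Option Int) (last : Int) :
    pvFinA (b ++ g.1, g.2) last = b ++ pvFinA g last := by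
  cases g with
  | mk x st => cases st <;> simp [pvFinA]

-- A's foldl form equals the tail-recursive form pvRunA
lemma pvBridge (t : List Int) (k : Int) (st : Option Int) :
    pvFinA ((pvEnumFrom k t).foldl pvStepA ([], st)) (k + t.length - 1) = pvRunA t k st := by
  induction t generalizing k st with
  | nil => cases st <;> simp [pvEnumFrom, pvFinA, pvRunA]
  | cons v t ih =>
    simp only [pvEnumFrom, List.foldl_cons, List.length_cons]
    have harith : k + (((t.length : Int)) + 1) - 1 = (k + 1) + (t.length : Int) - 1 := by ring
    by_cases h1 : v = 1 ∧ st = none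
    · have hA : pvStepA ([], st) (k, v) = ([], some k) := by simp [pvStepA, h1.1, h1.2]
      rw [hA]
      push_cast
      rw [harith, ih (k + 1) (some k)]
      simp [pvRunA, h1.1, h1.2]
    · by_cases h2 : v = 0 ∧ st ≠ none
      · have hA : pvStepA ([], st) (k, v) = ([(st.getD 0, k - 1)], none) := by
          simp [pvStepA, h2.1, h2.2]
        rw [hA, pvA_acc, pvFinA_append]
        push_cast
        rw [harith, ih (k + 1) none]
        cases st with
        | none => exact absurd rfl h2.2
        | some s => simp [pvRunA, h2.1]
      · have hA : pvStepA ([], st) (k, v) = ([], st) := by simp [pvStepA, h1, h2]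
        rw [hA]
        push_cast
        rw [harith, ih (k + 1) st]
        cases st with
        | none =>
          have hv1 : ¬ v = 1 := by intro h; exact h1 ⟨h, rfl⟩
          simp [pvRunA, hv1]
        | some s =>
          have hv0 : ¬ v = 0 := by intro h; exact h2 ⟨h, by simp⟩
          simp [pvRunA, hv0]

-- main equivalence of the two tail recursions
lemma pvMain (t : List Int) : ∀ k : Int,
    pvRunA t k none = pvScan k t ∧
    ∀ s : Int, pvRunA t k (some s) =
      (s, (pvFindEnd k t).1 - 1) :: pvScan ((pvFindEnd k t).1 + 1) (pvFindEnd k t).2 := by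
  induction t with
  | nil =>
    intro k
    refine ⟨by simp [pvRunA, pvScan], fun s => by simp [pvRunA, pvFindEnd, pvScan]⟩
  | cons v t ih =>
    intro k
    constructor
    · by_cases h1 : v = 1
      · rw [show pvRunA (v :: t) k none = pvRunA t (k + 1) (some k) by simp [pvRunA, h1]]
        rw [(ih (k + 1)).2 k]
        simp [pvScan, h1]
      · rw [show pvRunA (v :: t) k none = pvRunA t (k + 1) none by simp [pvRunA, h1]]
        rw [(ih (k + 1)).1]
        simp [pvScan, h1]
    · intro s
      by_cases h0 : v = 0
      · rw [show pvRunA (v :: t) k (some s) = (s, k - 1) :: pvRunA t (k + 1) none by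
          simp [pvRunA, h0]]
        rw [(ih (k + 1)).1]
        simp [pvFindEnd, h0]
      · rw [show pvRunA (v :: t) k (some s) = pvRunA t (k + 1) (some s) by
          simp [pvRunA, h0]]
        rw [(ih (k + 1)).2 s]
        simp [pvFindEnd, h0]

-- ===== VERDICT (by name: the statement is the Claim_ definition above) =====
theorem identify_bouts_spec : Claim_equal_identify_bouts := by
  intro sequence _
  unfold Spec_identify_bouts identify_bouts identify_bouts_alt
  have h := pvBridge sequence 0 none
  simp only [pvFinA, zero_add] at h ⊢
  rw [h, (pvMain sequence 0).1]
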